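-- pv_equiv track=rewrite | github.com/CSACHIN77/Sagar_LIVE | strategy_live/utils.py | slice_orders
-- ===== SOURCE A (Python) =====
-- def slice_orders(total_quantity, freeze_quantity):
--     order_quantities = []
--     while total_quantity > freeze_quantity:
--         order_quantities.append(freeze_quantity)
--         total_quantity -= freeze_quantity
--     if total_quantity > 0:
--         order_quantities.append(total_quantity)
--     return order_quantities
-- ===== SOURCE B (Python) =====
-- def slice_orders(total_quantity, freeze_quantity):
--     if total_quantity <= 0:
--         return []
--     q, r = divmod(total_quantity, freeze_quantity)
--     if r == 0:
--         return [freeze_quantity] * q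
--     return [freeze_quantity] * q + [r]
-- ===== Notes on version B (the rewrite author's own statement) =====
-- stated objective: faster
-- what changed: Replaces the repeated-subtraction while loop by a single divmod that computes the slice count and remainder up front and builds the list directly; Pre_ excludes total_quantity > freeze_quantity with freeze_quantity <= 0, where A's loop never returns.
import Mathlib
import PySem

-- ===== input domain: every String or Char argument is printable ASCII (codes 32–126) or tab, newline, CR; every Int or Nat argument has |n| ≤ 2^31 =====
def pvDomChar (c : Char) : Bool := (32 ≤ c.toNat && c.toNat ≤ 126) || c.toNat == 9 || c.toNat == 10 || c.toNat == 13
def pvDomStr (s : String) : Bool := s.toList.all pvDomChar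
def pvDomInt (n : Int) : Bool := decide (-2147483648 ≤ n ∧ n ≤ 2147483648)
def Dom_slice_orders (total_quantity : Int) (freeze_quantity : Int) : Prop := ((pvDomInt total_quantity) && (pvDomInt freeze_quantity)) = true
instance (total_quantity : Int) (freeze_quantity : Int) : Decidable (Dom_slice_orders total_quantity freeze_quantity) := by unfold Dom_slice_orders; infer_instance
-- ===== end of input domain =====

-- B replaces A's repeated-subtraction loop with a single divmod and direct list construction;
-- Pre_ excludes total_quantity > freeze_quantity ∧ freeze_quantity ≤ 0, where A's loop never returns.


-- ===== PORT A =====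
-- the while loop; the 'freeze_quantity > 0' side of the guard is a totality guard only:
-- when freeze_quantity ≤ 0 and total_quantity > freeze_quantity the Python loop never returns (outside Pre_).
def sliceLoopA (total_quantity : Int) (freeze_quantity : Int) (acc : List Int) : List Int :=
  if _h : total_quantity > freeze_quantity ∧ freeze_quantity > 0 then
    sliceLoopA (total_quantity - freeze_quantity) freeze_quantity (acc ++ [freeze_quantity])
  else if total_quantity > freeze_quantity then
    acc  -- unreachable inside Pre_: Python diverges here
  else if total_quantity > 0 then acc ++ [total_quantity] else acc
termination_by total_quantity.toNat
decreasing_by omega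

def slice_orders (total_quantity : Int) (freeze_quantity : Int) : List Int :=
  sliceLoopA total_quantity freeze_quantity []

-- ===== PORT B =====
def slice_orders_alt (total_quantity : Int) (freeze_quantity : Int) : List Int :=
  if total_quantity ≤ 0 then []
  else
    match PySem.Int.divmod? total_quantity freeze_quantity with
    | none => []  -- ZeroDivisionError in Python; outside Pre_
    | some (q, r) =>
      if r = 0 then List.replicate q.toNat freeze_quantity
      else List.replicate q.toNat freeze_quantity ++ [r]

-- ===== PRECONDITION & SPEC =====
-- Pre_ excludes exactly the inputs where A never returns (infinite loop):
-- total_quantity > freeze_quantity with freeze_quantity ≤ 0.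
def Pre_slice_orders (total_quantity : Int) (freeze_quantity : Int) : Prop :=
  freeze_quantity > 0 ∨ total_quantity ≤ freeze_quantity
instance (total_quantity : Int) (freeze_quantity : Int) : Decidable (Pre_slice_orders total_quantity freeze_quantity) := by unfold Pre_slice_orders; infer_instance

def pvWitness_slice_orders : Int × Int := (7, 3)

def Spec_slice_orders (total_quantity : Int) (freeze_quantity : Int) (out : List Int) : Prop := out = slice_orders_alt total_quantity freeze_quantity
instance (total_quantity : Int) (freeze_quantity : Int) (out : List Int) : Decidable (Spec_slice_orders total_quantity freeze_quantity out) := by unfold Spec_slice_orders; infer_instance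

-- ===== CLAIM (what is proved, stated in full; the proofs are below) =====
def Claim_equal_slice_orders : Prop := ∀ (total_quantity : Int) (freeze_quantity : Int), Dom_slice_orders total_quantity freeze_quantity → Pre_slice_orders total_quantity freeze_quantity → Spec_slice_orders total_quantity freeze_quantity (slice_orders total_quantity freeze_quantity)

-- ===== LEMMAS AND PROOFS =====

-- unfolding B past the divmod for a nonzero divisor and positive total
theorem alt_unfold (t f : Int) (hne : f ≠ 0) (ht : 0 < t) :
    slice_orders_alt t f = if t.fmod f = 0 then List.replicate (t.fdiv f).toNat f
              else List.replicate (t.fdiv f).toNat f ++ [t.fmod f] := by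
  simp [slice_orders_alt, PySem.Int.divmod?, hne, show ¬ t ≤ 0 by omega]

-- recurrence for B: one freeze-sized slice peels off
theorem alt_step (t f : Int) (hf : 0 < f) (ht : f < t) :
    slice_orders_alt t f = f :: slice_orders_alt (t - f) f := by
  have hne : f ≠ 0 := by omega
  have hq : t.fdiv f = (t - f).fdiv f + 1 := by
    rw [Int.fdiv_eq_ediv_of_nonneg _ (le_of_lt hf), Int.fdiv_eq_ediv_of_nonneg _ (le_of_lt hf)]
    have h := Int.add_mul_ediv_right (t - f) 1 hne
    rw [one_mul, sub_add_cancel] at h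
    exact h
  have hr : t.fmod f = (t - f).fmod f := by
    rw [Int.fmod_eq_emod_of_nonneg _ (le_of_lt hf), Int.fmod_eq_emod_of_nonneg _ (le_of_lt hf),
      Int.sub_emod_right]
  have hq0 : 0 ≤ (t - f).fdiv f := by
    rw [Int.fdiv_eq_ediv_of_nonneg _ (le_of_lt hf)]
    exact Int.ediv_nonneg (by omega) (by omega)
  have hnat : ((t - f).fdiv f + 1).toNat = ((t - f).fdiv f).toNat + 1 := by omega
  rw [alt_unfold t f hne (by omega), hq, hr, hnat, alt_unfold (t - f) f hne (by omega)]
  split <;> simp [List.replicate_succ]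

-- base case for B: a single slice
theorem alt_base (t f : Int) (hf : 0 < f) (ht : 0 < t) (hle : t ≤ f) :
    slice_orders_alt t f = [t] := by
  have hne : f ≠ 0 := by omega
  rw [alt_unfold t f hne ht]
  rcases eq_or_lt_of_le hle with heq | hlt
  · subst heq
    simp [Int.fdiv_self hne, Int.fmod_self]
  · have h1 : t.fdiv f = 0 := by
      rw [Int.fdiv_eq_ediv_of_nonneg _ (le_of_lt hf)]
      exact Int.ediv_eq_zero_of_lt (by omega) hlt
    have h2 : t.fmod f = t := by
      rw [Int.fmod_eq_emod_of_nonneg _ (le_of_lt hf)]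
      exact Int.emod_eq_of_lt (by omega) hlt
    simp [h1, h2, show ¬ t = 0 by omega]

-- loop invariant: the while loop appends exactly B's list
theorem loopA_eq (t f : Int) (hf : 0 < f) (acc : List Int) :
    sliceLoopA t f acc = acc ++ slice_orders_alt t f := by
  fun_induction sliceLoopA t f acc with
  | case1 t acc h ih =>
      rw [ih, alt_step t f hf h.1]
      simp
  | case2 t acc h h2 => omega
  | case3 t acc h h2 h3 =>
      rw [alt_base t f hf h3 (by omega)]
  | case4 t acc h h2 h3 =>
      have : slice_orders_alt t f = [] := by
        simp [slice_orders_alt, if_pos (by omega : t ≤ 0)]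
      simp [this]

-- ===== VERDICT (by name: the statement is the Claim_ definition above) =====
theorem slice_orders_spec : Claim_equal_slice_orders := by
  intro t f _ hpre
  unfold Spec_slice_orders slice_orders
  by_cases hf : 0 < f
  · simpa using loopA_eq t f hf []
  · have ht : t ≤ f := hpre.resolve_left hf
    rw [sliceLoopA, dif_neg (by omega : ¬ (t > f ∧ f > 0)), if_neg (by omega : ¬ t > f),
      if_neg (by omega : ¬ t > 0)]
    simp [slice_orders_alt, show t ≤ 0 by omega]
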